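-- pv_equiv track=rewrite | github.com/hao-ai-lab/distca | d2/planner/planner.py | postprocess_items
-- ===== SOURCE A (Python) =====
-- from collections import defaultdict
-- from copy import deepcopy
--
-- def postprocess_items(items) -> list[dict]:
--     """
--     Postprocess the items to add a "shard_id" field.
--     The "shard_id" field is always 0 for the original sequence.
--     For each non-original sequence, shard_id = how short the `kv` is among all the shards in the same sequence (ranking of `kv` sort ASC)
--     - collect all the sequences that has the same `src_gpuid` and `seqid`
--     - sort them by the `kv` to determine the shard id of that sequence.
--     """
--     items = deepcopy(items)
--
--     for item in items:
--         if item["is_original"]: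
--             item["shard_id"] = 0
--
--     # now handle the non-original sequences.
--     non_original_items = [item for item in items if not item["is_original"]]
--     src_gpuid_seqid_to_items = defaultdict(list)
--     for item in non_original_items:
--         src_gpuid_seqid_to_items[(item["src_gpuid"], item["seqid"])].append(item)
--
--     for src_gpuid_seqid, items_ in src_gpuid_seqid_to_items.items():
--         items_.sort(key=lambda x: x["kv"])
--         for i, item in enumerate(items_):
--             item["shard_id"] = i
--     return items
-- ===== SOURCE B (Python) =====
-- from copy import deepcopy
--
-- def postprocess_items(items) -> list[dict]:
--     """
--     Same contract as A: shard_id = 0 for originals; for non-originals, shard_id is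
--     the ascending-kv rank within the (src_gpuid, seqid) group. Instead of sorting
--     each group separately, do ONE global stable sort of all non-original items by
--     kv and dispatch ranks with a per-group counter in a single pass.
--     """
--     items = deepcopy(items)
--     for item in items:
--         if item["is_original"]:
--             item["shard_id"] = 0
--     counters = {}
--     for item in sorted((it for it in items if not it["is_original"]), key=lambda x: x["kv"]):
--         key = (item["src_gpuid"], item["seqid"])
--         c = counters.get(key, 0)
--         item["shard_id"] = c
--         counters[key] = c + 1
--     return items
-- ===== Notes on version B (the rewrite author's own statement) =====
-- stated objective: alternative
-- what changed: Replaces A's per-group sorts (group items into a dict of lists, sort each group by kv, enumerate) by ONE global stable sort of all non-original items by kv followed by a single counting-dispatch pass with a per-(src_gpuid, seqid) counter dict; ranks are identical because the stable sort preserves the within-group order of equal-kv items.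
import Mathlib
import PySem

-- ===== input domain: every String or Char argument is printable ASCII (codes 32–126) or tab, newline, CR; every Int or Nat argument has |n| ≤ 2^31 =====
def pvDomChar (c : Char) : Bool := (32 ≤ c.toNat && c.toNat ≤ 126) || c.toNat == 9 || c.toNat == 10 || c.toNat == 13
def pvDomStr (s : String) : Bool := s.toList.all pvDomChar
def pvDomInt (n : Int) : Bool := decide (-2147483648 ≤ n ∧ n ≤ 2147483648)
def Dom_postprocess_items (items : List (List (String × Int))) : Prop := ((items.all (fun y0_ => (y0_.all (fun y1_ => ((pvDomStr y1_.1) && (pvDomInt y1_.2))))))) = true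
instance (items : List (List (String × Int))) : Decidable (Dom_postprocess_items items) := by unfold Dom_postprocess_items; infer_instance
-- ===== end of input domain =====

-- B replaces A's per-group sorts by ONE global stable sort by kv plus a single
-- counter-dispatch pass over it (same ranks because the stable sort keeps the
-- within-group order of equal-kv items); objective: alternative decomposition.
-- Python A/B mutate the deepcopied dicts in place; the ports model the item
-- dicts by their position in the list, which is faithful because each dict
-- object occurs at exactly one position of the copied list.

-- ===== PORT A =====
-- shared helpers (identical lines of the two Pythons): dict access/truthiness,
-- the first loop marking originals, and writing shard_id back into the items.
def pvGetD (d : PySem.Dict String Int) (k : String) : Int := d.getD k 0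
def pvIsOrig (d : PySem.Dict String Int) : Bool := pvGetD d "is_original" != 0
def pvMark (ds : List (PySem.Dict String Int)) : List (PySem.Dict String Int) :=
  ds.map (fun d => if pvIsOrig d then d.insert "shard_id" 0 else d)
def pvAt (ds : List (PySem.Dict String Int)) (i : Nat) : PySem.Dict String Int :=
  ds.getD i PySem.Dict.empty
def pvKv (ds : List (PySem.Dict String Int)) (i : Nat) : Int := pvGetD (pvAt ds i) "kv"
def pvGrp (ds : List (PySem.Dict String Int)) (i : Nat) : Int × Int :=
  (pvGetD (pvAt ds i) "src_gpuid", pvGetD (pvAt ds i) "seqid")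
def pvNonOrig (ds : List (PySem.Dict String Int)) : List Nat :=
  (List.range ds.length).filter (fun i => !pvIsOrig (pvAt ds i))
def pvApply (ds : List (PySem.Dict String Int)) (us : List (Nat × Int)) :
    List (PySem.Dict String Int) :=
  us.foldl (fun a p => a.modify p.1 (fun d => d.insert "shard_id" p.2)) ds

def postprocess_items (items : List (List (String × Int))) : List (List (String × Int)) :=
  let ds := pvMark (items.map PySem.Dict.mk)
  -- src_gpuid_seqid_to_items: defaultdict(list) over the non-original items
  let g : PySem.Dict (Int × Int) (List Nat) :=
    (pvNonOrig ds).foldl (fun g i => g.modify (pvGrp ds i) [] (fun l => l ++ [i])) PySem.Dict.empty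
  -- per group: sort by kv, then enumerate to assign shard ids
  let updates := g.items.flatMap (fun p =>
    (PySem.List.enumerate (PySem.List.sorted p.2 (fun i => pvKv ds i) false)).map (fun q => (q.2, q.1)))
  (pvApply ds updates).map PySem.Dict.items

-- ===== PORT B =====
-- the counter-dispatch pass: each item gets the current counter of its group
def pvDispatch (ds : List (PySem.Dict String Int)) (cnt : PySem.Dict (Int × Int) Int) :
    List Nat → List (Nat × Int)
  | [] => []
  | i :: rest =>
    let c := cnt.getD (pvGrp ds i) 0
    (i, c) :: pvDispatch ds (cnt.insert (pvGrp ds i) (c + 1)) rest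

def postprocess_items_alt (items : List (List (String × Int))) : List (List (String × Int)) :=
  let ds := pvMark (items.map PySem.Dict.mk)
  let updates := pvDispatch ds PySem.Dict.empty
    (PySem.List.sorted (pvNonOrig ds) (fun i => pvKv ds i) false)
  (pvApply ds updates).map PySem.Dict.items

-- ===== PRECONDITION & SPEC =====
-- Pre_ excludes (a) items missing the "is_original" key, or missing
-- "src_gpuid"/"seqid"/"kv" while non-original, on which A raises KeyError, and
-- (b) items whose association list has duplicate keys, which a Python dict
-- cannot represent (the list→dict conversion collapses them).
def Pre_postprocess_items (items : List (List (String × Int))) : Prop :=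
  ∀ it ∈ items, (it.map Prod.fst).Nodup ∧ "is_original" ∈ it.map Prod.fst ∧
    (it.lookup "is_original" = some 0 →
      "src_gpuid" ∈ it.map Prod.fst ∧ "seqid" ∈ it.map Prod.fst ∧ "kv" ∈ it.map Prod.fst)
instance (items : List (List (String × Int))) : Decidable (Pre_postprocess_items items) := by
  unfold Pre_postprocess_items; infer_instance

def pvWitness_postprocess_items : (List (List (String × Int))) :=
  [[("is_original", 1)],
   [("is_original", 0), ("src_gpuid", 1), ("seqid", 2), ("kv", 5)],
   [("is_original", 0), ("src_gpuid", 1), ("seqid", 2), ("kv", 3)]]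

def Spec_postprocess_items (items : List (List (String × Int)))
    (out : List (List (String × Int))) : Prop := out = postprocess_items_alt items
instance (items : List (List (String × Int))) (out : List (List (String × Int))) :
    Decidable (Spec_postprocess_items items out) := by unfold Spec_postprocess_items; infer_instance

-- ===== CLAIM (what is proved, stated in full; the proofs are below) =====
def Claim_equal_postprocess_items : Prop := ∀ (items : List (List (String × Int))), Dom_postprocess_items items → Pre_postprocess_items items → Spec_postprocess_items items (postprocess_items items)

-- ===== LEMMAS AND PROOFS =====

-- x goes to the front when it precedes every element
lemma insertBy_cons_of_forall {α : Type} (bef : α → α → Bool) (x : α) (zs : List α)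
    (h : ∀ z ∈ zs, bef x z = true) :
    PySem.List.insertBy bef x zs = x :: zs := by
  cases zs with
  | nil => rfl
  | cons z zs => simp [PySem.List.insertBy, h z (by simp)]

-- filtering commutes with a stable insertion into a sorted list
lemma insertBy_filter {α κ : Type} [LinearOrder κ] (key : α → κ) (p : α → Bool) (x : α)
    (ys : List α) (h : ys.Pairwise (fun a b => key a ≤ key b)) :
    (PySem.List.insertBy (fun a b => decide (key a < key b)) x ys).filter p
      = if p x then PySem.List.insertBy (fun a b => decide (key a < key b)) x (ys.filter p)
        else ys.filter p := by
  induction ys with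
  | nil => simp [PySem.List.insertBy]; split <;> simp_all [PySem.List.insertBy]
  | cons y ys ih =>
    rw [List.pairwise_cons] at h
    by_cases hxy : key x < key y
    · simp only [PySem.List.insertBy, decide_eq_true_eq, if_pos hxy]
      by_cases hpx : p x
      · by_cases hpy : p y
        · simp [List.filter, hpx, hpy, PySem.List.insertBy, hxy]
        · simp only [List.filter, hpx, hpy]
          rw [insertBy_cons_of_forall]
          · simp [hpx]
          · intro z hz
            have hz' : z ∈ y :: ys := List.mem_cons_of_mem y (List.mem_of_mem_filter hz)
            rcases List.mem_cons.mp hz' with rfl | hz''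
            · simp [hxy]
            · have := h.1 z hz''
              simp; exact lt_of_lt_of_le hxy this
      · simp [List.filter, hpx]
    · simp only [PySem.List.insertBy, decide_eq_true_eq, if_neg hxy]
      by_cases hpy : p y
      · simp only [List.filter, hpy, cond_true]
        rw [ih h.2]
        by_cases hpx : p x
        · simp [hpx, PySem.List.insertBy, hxy]
        · simp [hpx]
      · simp only [List.filter, hpy, cond_false]
        rw [ih h.2]

lemma sorted_append_singleton {α κ : Type} [LinearOrder κ] (key : α → κ) (xs : List α) (x : α) :
    PySem.List.sorted (xs ++ [x]) key false
      = PySem.List.insertBy (fun a b => decide (key a < key b)) x (PySem.List.sorted xs key false) := by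
  rw [PySem.List.sorted_eq_foldl_insertBy, PySem.List.sorted_eq_foldl_insertBy, List.foldl_append]
  rfl

-- a stable sort commutes with filtering
lemma sorted_filter {α κ : Type} [LinearOrder κ] (key : α → κ) (p : α → Bool) (xs : List α) :
    (PySem.List.sorted xs key false).filter p = PySem.List.sorted (xs.filter p) key false := by
  induction xs using List.reverseRecOn with
  | nil => rfl
  | append_singleton xs x ih =>
    rw [sorted_append_singleton, insertBy_filter key p x _ (PySem.List.sorted_pairwise xs key),
      ih, List.filter_append]
    by_cases hpx : p x
    · simp [hpx, sorted_append_singleton]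
    · simp [hpx]

-- lookup in the counter-dispatch output
lemma lookup_dispatch (ds : List (PySem.Dict String Int)) (cnt : PySem.Dict (Int × Int) Int)
    (zs : List Nat) (j : Nat) :
    (pvDispatch ds cnt zs).lookup j
      = if j ∈ zs then
          some (cnt.getD (pvGrp ds j) 0
            + ((zs.takeWhile (fun i => i != j)).filter
                (fun i => pvGrp ds i == pvGrp ds j)).length)
        else none := by
  induction zs generalizing cnt with
  | nil => simp [pvDispatch]
  | cons i rest ih =>
    by_cases hij : i = j
    · subst hij
      simp [pvDispatch, List.lookup, List.takeWhile]
    · have hne : (j == i) = false := by simpa using Ne.symm hij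
      have hne2 : (i != j) = true := by simpa using hij
      simp only [pvDispatch, List.lookup, hne, List.mem_cons]
      rw [ih]
      by_cases hjr : j ∈ rest
      · simp only [hjr, if_true, List.takeWhile, hne2, or_true, if_pos]
        by_cases hg : pvGrp ds i = pvGrp ds j
        · rw [hg, PySem.Dict.getD_insert_self]
          simp only [List.filter, hg, beq_self_eq_true, cond_true, List.length_cons]
          congr 1
          push_cast
          ring
        · have hb : (pvGrp ds i == pvGrp ds j) = false := by simpa using hg
          rw [PySem.Dict.getD_insert]
          simp [List.filter, hb, Ne.symm hg]
      · simp [hjr, Ne.symm hij]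

-- the indices updated by the dispatch are exactly zs
lemma map_fst_dispatch (ds : List (PySem.Dict String Int)) (cnt : PySem.Dict (Int × Int) Int)
    (zs : List Nat) : (pvDispatch ds cnt zs).map Prod.fst = zs := by
  induction zs generalizing cnt with
  | nil => rfl
  | cons i rest ih => simp [pvDispatch, ih]

-- lookup in the (rank → index) pairs of one enumerated block
lemma lookup_enumMap (xs : List Nat) (s : Int) (j : Nat) (hj : j ∈ xs) :
    ((PySem.List.enumerate xs s).map (fun q => (q.2, q.1))).lookup j = some (s + (xs.idxOf j : Int)) := by
  induction xs generalizing s with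
  | nil => simp at hj
  | cons x xs ih =>
    by_cases hxj : x = j
    · subst hxj
      simp [PySem.List.enumerate_cons, List.lookup, List.idxOf_cons_self]
    · have hne : (j == x) = false := by simp [Ne.symm hxj]
      have hj' : j ∈ xs := by rcases List.mem_cons.mp hj with h | h; exact absurd h.symm hxj; exact h
      simp only [PySem.List.enumerate_cons, List.map, List.lookup, hne]
      rw [ih (s + 1) hj', List.idxOf_cons_ne _ hxj]
      congr 1
      push_cast
      ring

lemma lookup_eq_none_of_not_mem {us : List (Nat × Int)} {j : Nat}
    (h : j ∉ us.map Prod.fst) : us.lookup j = none := by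
  induction us with
  | nil => rfl
  | cons u us ih =>
    simp only [List.map, List.mem_cons, not_or] at h
    have : (j == u.1) = false := by simp [h.1]
    cases u; simp only [List.lookup, this]; exact ih h.2

lemma lookup_append_of_none {us vs : List (Nat × Int)} {j : Nat}
    (h : us.lookup j = none) : (us ++ vs).lookup j = vs.lookup j := by
  induction us with
  | nil => rfl
  | cons u us ih =>
    cases u
    simp only [List.lookup, List.cons_append] at h ⊢
    split at h
    · exact absurd h (by simp)
    · simp_all [List.lookup]

lemma lookup_flatMap_none {β : Type} (ks : List β) (F : β → List (Nat × Int)) (j : Nat)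
    (h : ∀ k ∈ ks, (F k).lookup j = none) : (ks.flatMap F).lookup j = none := by
  induction ks with
  | nil => rfl
  | cons k ks ih =>
    rw [List.flatMap_cons, lookup_append_of_none (h k (by simp))]
    exact ih (fun x hx => h x (by simp [hx]))

lemma lookup_append_of_some {us vs : List (Nat × Int)} {j : Nat} {v : Int}
    (h : us.lookup j = some v) : (us ++ vs).lookup j = some v := by
  induction us with
  | nil => simp [List.lookup] at h
  | cons u us ih =>
    cases u
    simp only [List.lookup, List.cons_append] at h ⊢
    split at h <;> simp_all

lemma lookup_flatMap_of_unique {β : Type} (ks : List β) (F : β → List (Nat × Int)) (j : Nat)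
    (k₀ : β) (v : Int) (hmem : k₀ ∈ ks) (hself : (F k₀).lookup j = some v)
    (hother : ∀ k ∈ ks, k ≠ k₀ → (F k).lookup j = none) :
    (ks.flatMap F).lookup j = some v := by
  induction ks with
  | nil => simp at hmem
  | cons k ks ih =>
    rw [List.flatMap_cons]
    by_cases hk : k = k₀
    · subst hk; exact lookup_append_of_some hself
    · have h1 : (F k).lookup j = none := hother k (by simp) hk
      have hmem' : k₀ ∈ ks := by rcases List.mem_cons.mp hmem with h | h; exact absurd h.symm hk; exact h
      rw [lookup_append_of_none h1]
      exact ih hmem' (fun x hx => hother x (by simp [hx]))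

-- index in a filtered list = kept elements strictly before the first occurrence
lemma idxOf_filter_eq_takeWhile (p : Nat → Bool) (zs : List Nat) (j : Nat)
    (hj : j ∈ zs) (hpj : p j = true) :
    (zs.filter p).idxOf j = ((zs.takeWhile (fun i => i != j)).filter p).length := by
  induction zs with
  | nil => simp at hj
  | cons a zs ih =>
    by_cases haj : a = j
    · subst haj
      simp [List.filter, hpj, List.takeWhile, List.idxOf_cons_self]
    · have hj' : j ∈ zs := by rcases List.mem_cons.mp hj with h | h; exact absurd h.symm haj; exact h
      have hne : (a != j) = true := by simp [haj]
      by_cases hpa : p a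
      · simp only [List.filter, hpa, List.takeWhile, hne, cond_true]
        rw [List.idxOf_cons_ne _ haj, ih hj']
        simp [List.filter, hpa]
      · simp only [List.filter, hpa, List.takeWhile, hne, cond_false, cond_true]
        rw [ih hj']

-- characterisation of writing the updates back
lemma getElem?_pvApply (ds : List (PySem.Dict String Int)) (us : List (Nat × Int)) (j : Nat)
    (hnd : (us.map Prod.fst).Nodup) :
    (pvApply ds us)[j]? = match us.lookup j with
      | some v => ds[j]?.map (fun d => d.insert "shard_id" v)
      | none => ds[j]? := by
  induction us generalizing ds with
  | nil => simp [pvApply]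
  | cons u us ih =>
    obtain ⟨i, v⟩ := u
    simp only [List.map, List.nodup_cons] at hnd
    have step : pvApply ds ((i, v) :: us)
        = pvApply (ds.modify i (fun d => d.insert "shard_id" v)) us := rfl
    rw [step, ih _ hnd.2]
    by_cases hij : j = i
    · subst hij
      have : us.lookup j = none := lookup_eq_none_of_not_mem hnd.1
      simp [this, List.lookup, List.getElem?_modify]
    · have hne : (j == i) = false := by simp [hij]
      simp only [List.lookup, hne]
      have hmod : (ds.modify i (fun d => d.insert "shard_id" v))[j]? = ds[j]? := by
        simp [List.getElem?_modify, Ne.symm hij]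
      cases h : us.lookup j <;> simp [hmod]

-- proof-only abbreviations for the two ports' update lists
def pvG (ds : List (PySem.Dict String Int)) : PySem.Dict (Int × Int) (List Nat) :=
  (pvNonOrig ds).foldl (fun g i => g.modify (pvGrp ds i) [] (fun l => l ++ [i])) PySem.Dict.empty
def pvUA (ds : List (PySem.Dict String Int)) : List (Nat × Int) :=
  (pvG ds).items.flatMap (fun p =>
    (PySem.List.enumerate (PySem.List.sorted p.2 (fun i => pvKv ds i) false)).map (fun q => (q.2, q.1)))
def pvUB (ds : List (PySem.Dict String Int)) : List (Nat × Int) :=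
  pvDispatch ds PySem.Dict.empty (PySem.List.sorted (pvNonOrig ds) (fun i => pvKv ds i) false)

lemma pvG_keys (ds : List (PySem.Dict String Int)) :
    (pvG ds).keys = PySem.Set.ofList ((pvNonOrig ds).map (pvGrp ds)) := by
  unfold pvG
  rw [PySem.Dict.keys_foldl_modify_key (pvNonOrig ds) (pvGrp ds) [] (fun _ i => (fun l => l ++ [i])),
    PySem.Dict.keys_empty, PySem.Set.update_nil_left]

lemma pvG_nodup_keys (ds : List (PySem.Dict String Int)) : (pvG ds).keys.Nodup := by
  rw [pvG_keys]; exact PySem.Set.nodup_ofList _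

lemma pvG_getD (ds : List (PySem.Dict String Int)) (k : Int × Int) :
    (pvG ds).getD k [] = (pvNonOrig ds).filter (fun i => pvGrp ds i == k) := by
  unfold pvG
  have h : (pvNonOrig ds).foldl (fun g i => g.modify (pvGrp ds i) [] (fun l => l ++ [i]))
        PySem.Dict.empty
      = ((pvNonOrig ds).map (fun i => (pvGrp ds i, i))).foldl
          (fun d p => d.modify p.1 [] (fun l => l ++ [p.2])) PySem.Dict.empty :=
    (List.foldl_map (f := fun i => (pvGrp ds i, i))
      (g := fun d p => d.modify p.1 [] (fun l => l ++ [p.2]))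
      (l := pvNonOrig ds) (init := PySem.Dict.empty)).symm
  rw [h, PySem.Dict.getD_foldl_modify_append, PySem.Dict.getD_empty, List.nil_append,
    List.filter_map, List.map_map]
  exact List.map_id'' (fun _ => rfl) _

lemma nodup_nonOrig (ds : List (PySem.Dict String Int)) : (pvNonOrig ds).Nodup :=
  List.Nodup.filter _ List.nodup_range

lemma nodup_fst_uB (ds : List (PySem.Dict String Int)) : ((pvUB ds).map Prod.fst).Nodup := by
  rw [pvUB, map_fst_dispatch]
  exact (PySem.List.sorted_perm (pvNonOrig ds) (fun i => pvKv ds i) false).symm.nodup (nodup_nonOrig ds)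

lemma pvUA_eq (ds : List (PySem.Dict String Int)) :
    pvUA ds = (pvG ds).keys.flatMap (fun k =>
      (PySem.List.enumerate (PySem.List.sorted ((pvG ds).getD k [])
        (fun i => pvKv ds i) false)).map (fun q => (q.2, q.1))) := by
  rw [pvUA, PySem.Dict.items_eq_map_keys (pvG ds) (pvG_nodup_keys ds) [], List.flatMap_map]

lemma map_fst_block (xs : List Nat) (s : Int) :
    List.map Prod.fst ((PySem.List.enumerate xs s).map (fun q => (q.2, q.1))) = xs := by
  induction xs generalizing s with
  | nil => rfl
  | cons x xs ih => simp [PySem.List.enumerate_cons, ih]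

lemma nodup_fst_uA (ds : List (PySem.Dict String Int)) : ((pvUA ds).map Prod.fst).Nodup := by
  rw [pvUA_eq, List.map_flatMap, List.nodup_flatMap]
  constructor
  · intro k _
    rw [map_fst_block, pvG_getD]
    exact (PySem.List.sorted_perm _ _ false).symm.nodup (List.Nodup.filter _ (nodup_nonOrig ds))
  · refine List.Pairwise.imp ?_ (pvG_nodup_keys ds)
    intro k k' hkk' i hi hi'
    simp only [map_fst_block, PySem.List.mem_sorted, pvG_getD] at hi hi'
    have h1 : pvGrp ds i = k := by simpa using (List.mem_filter.mp hi).2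
    have h2 : pvGrp ds i = k' := by simpa using (List.mem_filter.mp hi').2
    exact hkk' (h1 ▸ h2)

lemma lookup_uA_eq_uB (ds : List (PySem.Dict String Int)) (j : Nat) :
    (pvUA ds).lookup j = (pvUB ds).lookup j := by
  rw [pvUB, lookup_dispatch, pvUA_eq]
  by_cases hj : j ∈ pvNonOrig ds
  · -- j is a non-original index
    have hjs : j ∈ PySem.List.sorted (pvNonOrig ds) (fun i => pvKv ds i) false :=
      (PySem.List.mem_sorted _ _ _ _).mpr hj
    have hk0 : pvGrp ds j ∈ (pvG ds).keys := by
      rw [pvG_keys, PySem.Set.mem_ofList]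
      exact List.mem_map.mpr ⟨j, hj, rfl⟩
    have hjG : j ∈ (pvG ds).getD (pvGrp ds j) [] := by
      rw [pvG_getD]
      exact List.mem_filter.mpr ⟨hj, by simp⟩
    have hjsG : j ∈ PySem.List.sorted ((pvG ds).getD (pvGrp ds j) []) (fun i => pvKv ds i) false :=
      (PySem.List.mem_sorted _ _ _ _).mpr hjG
    have hother : ∀ k ∈ (pvG ds).keys, k ≠ pvGrp ds j →
        (((PySem.List.enumerate (PySem.List.sorted ((pvG ds).getD k [])
          (fun i => pvKv ds i) false)).map (fun q => (q.2, q.1))).lookup j) = none := by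
      intro k hk hkne
      apply lookup_eq_none_of_not_mem
      rw [map_fst_block, PySem.List.mem_sorted, pvG_getD]
      intro hmem
      have hg : pvGrp ds j = k := by simpa using (List.mem_filter.mp hmem).2
      exact hkne hg.symm
    rw [lookup_flatMap_of_unique ((pvG ds).keys)
      (fun k => (PySem.List.enumerate (PySem.List.sorted ((pvG ds).getD k [])
        (fun i => pvKv ds i) false)).map (fun q => (q.2, q.1)))
      j (pvGrp ds j)
      ((0 : Int) + ((PySem.List.sorted ((pvG ds).getD (pvGrp ds j) [])
        (fun i => pvKv ds i) false).idxOf j : Int))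
      hk0 (lookup_enumMap _ 0 j hjsG) hother, if_pos hjs]
    congr 1
    rw [PySem.Dict.getD_empty]
    have hsf : PySem.List.sorted ((pvG ds).getD (pvGrp ds j) []) (fun i => pvKv ds i) false
        = (PySem.List.sorted (pvNonOrig ds) (fun i => pvKv ds i) false).filter
            (fun i => pvGrp ds i == pvGrp ds j) := by
      rw [pvG_getD, sorted_filter]
    rw [hsf, idxOf_filter_eq_takeWhile _ _ j hjs (by simp)]
  · -- j is an original index: no block contains it
    have hjs : j ∉ PySem.List.sorted (pvNonOrig ds) (fun i => pvKv ds i) false := by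
      rw [PySem.List.mem_sorted]; exact hj
    rw [if_neg hjs]
    apply lookup_flatMap_none
    intro k _
    apply lookup_eq_none_of_not_mem
    rw [map_fst_block, PySem.List.mem_sorted, pvG_getD]
    intro hmem
    exact hj (List.mem_filter.mp hmem).1

lemma apply_eq (ds : List (PySem.Dict String Int)) :
    pvApply ds (pvUA ds) = pvApply ds (pvUB ds) := by
  apply List.ext_getElem?
  intro j
  rw [getElem?_pvApply ds _ j (nodup_fst_uA ds), getElem?_pvApply ds _ j (nodup_fst_uB ds),
    lookup_uA_eq_uB]

-- ===== VERDICT (by name: the statement is the Claim_ definition above) =====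
theorem postprocess_items_spec : Claim_equal_postprocess_items := by
  intro items _ _
  unfold Spec_postprocess_items postprocess_items postprocess_items_alt
  exact congrArg (List.map PySem.Dict.items) (apply_eq (pvMark (items.map PySem.Dict.mk)))
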